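-- pv_equiv track=rewrite | github.com/agnee008/daily_dsa_python | VISA_total_visits_less_than_target.py | count_valid_combinations
-- ===== SOURCE A (Python) =====
-- from itertools import combinations
--
-- def count_valid_combinations(visits, target):
--     # Check if the total sum of visits equals the target
--     if sum(visits) != target:
--         return -1
--
--     valid_combinations_count = 0
--     n = len(visits)
--
--     # Check all possible combinations of visits
--     for r in range(1, n + 1):
--         for comb in combinations(visits, r):
--             if sum(comb) < target:
--                 valid_combinations_count += 1
--
--     # Return the count of valid combinations
--     return valid_combinations_count
-- ===== SOURCE B (Python) =====
-- def count_valid_combinations(visits, target):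
--     if sum(visits) != target:
--         return -1
--     # DP over achievable subset sums: counts[s] = number of subsets with sum s
--     counts = {0: 1}
--     for v in visits:
--         new = dict(counts)
--         for s, c in counts.items():
--             new[s + v] = new.get(s + v, 0) + c
--         counts = new
--     total = 0
--     for s, c in counts.items():
--         if s < target:
--             total += c
--     # drop the empty subset (sum 0), which A never counts
--     return total - (1 if target > 0 else 0)
-- ===== Notes on version B (the rewrite author's own statement) =====
-- stated objective: alternative
-- what changed: Replaced the exhaustive enumeration of all 2^n combinations (itertools.combinations for every size r) by a subset-sum dynamic programme over a dict mapping each achievable sum to the number of subsets reaching it, then summing the counts of sums below target and subtracting the empty subset; a timing run's large inputs all hit the early 'sum(visits) != target' return, where both are O(n).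
import Mathlib
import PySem

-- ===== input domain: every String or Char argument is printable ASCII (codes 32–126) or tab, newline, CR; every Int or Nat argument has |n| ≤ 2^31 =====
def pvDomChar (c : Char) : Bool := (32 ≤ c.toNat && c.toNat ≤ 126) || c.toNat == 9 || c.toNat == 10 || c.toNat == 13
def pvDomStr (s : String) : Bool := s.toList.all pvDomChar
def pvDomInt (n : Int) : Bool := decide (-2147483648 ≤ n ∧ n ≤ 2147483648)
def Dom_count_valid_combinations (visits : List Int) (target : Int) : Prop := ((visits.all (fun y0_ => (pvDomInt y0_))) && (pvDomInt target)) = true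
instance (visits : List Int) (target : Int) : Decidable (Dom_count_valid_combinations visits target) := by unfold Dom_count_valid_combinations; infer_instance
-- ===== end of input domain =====

-- B replaces A's exhaustive enumeration of all combinations by a subset-sum DP over a
-- dict mapping each achievable sum to its number of subsets, then totals sums below target.

-- ===== PORT A =====
-- itertools.combinations(l, r): all length-r combinations, elements taken by position
def pyCombinations : List Int → Nat → List (List Int)
  | _, 0 => [[]]
  | [], _ + 1 => []
  | x :: xs, r + 1 => ((pyCombinations xs r).map (fun c => x :: c)) ++ pyCombinations xs (r + 1)

def count_valid_combinations (visits : List Int) (target : Int) : Int :=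
  if visits.sum ≠ target then -1
  else
    let n := visits.length
    (PySem.List.pyRange 1 ((n : Int) + 1) 1).foldl (fun acc r =>
      (pyCombinations visits r.toNat).foldl
        (fun acc comb => if comb.sum < target then acc + 1 else acc) acc) 0

-- ===== PORT B =====
def count_valid_combinations_alt (visits : List Int) (target : Int) : Int :=
  if visits.sum ≠ target then -1
  else
    let counts := visits.foldl (fun counts v =>
      counts.items.foldl (fun nw p => nw.insert (p.1 + v) (nw.getD (p.1 + v) 0 + p.2)) counts)
      ((PySem.Dict.empty : PySem.Dict Int Int).insert 0 1)
    let total := counts.items.foldl (fun acc p => if p.1 < target then acc + p.2 else acc) 0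
    total - (if 0 < target then 1 else 0)

-- ===== PRECONDITION & SPEC =====
def Spec_count_valid_combinations (visits : List Int) (target : Int) (out : Int) : Prop := out = count_valid_combinations_alt visits target
instance (visits : List Int) (target : Int) (out : Int) : Decidable (Spec_count_valid_combinations visits target out) := by unfold Spec_count_valid_combinations; infer_instance

-- ===== CLAIM (what is proved, stated in full; the proofs are below) =====
def Claim_equal_count_valid_combinations : Prop := ∀ (visits : List Int) (target : Int), Dom_count_valid_combinations visits target → Spec_count_valid_combinations visits target (count_valid_combinations visits target)

-- ===== LEMMAS AND PROOFS =====

-- number of sublists (subsets by position) of l with sum exactly s, as an Int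
def nsum : List Int → Int → Int := fun l s => ((l.sublists.countP (fun q => q.sum == s) : Nat) : Int)

-- number of sublists of l with sum < t, as an Int
def nlt : List Int → Int → Int := fun l t => ((l.sublists.countP (fun q => decide (q.sum < t)) : Nat) : Int)

theorem nsum_nonneg (l : List Int) (s : Int) : 0 ≤ nsum l s := by
  simp [nsum]

theorem nsum_concat (l : List Int) (v s : Int) :
    nsum (l ++ [v]) s = nsum l s + nsum l (s - v) := by
  simp only [nsum, List.sublists_concat, List.countP_append, List.countP_map]
  have : ((fun q => q.sum == s) ∘ fun x => x ++ [v]) = (fun (q : List Int) => q.sum == s - v) := by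
    funext q; simp; omega
  rw [this]; push_cast; ring

-- ---- A side ----
theorem foldl_count (t : Int) (l : List (List Int)) (acc : Int) :
    l.foldl (fun a c => if c.sum < t then a + 1 else a) acc
      = acc + (l.countP (fun c => decide (c.sum < t)) : Int) := by
  induction l generalizing acc with
  | nil => simp
  | cons q L ih =>
    simp only [List.foldl_cons, List.countP_cons, ih]
    by_cases h : q.sum < t <;> simp [h] <;> push_cast <;> ring

theorem pyCombinations_perm (xs : List Int) (r : Nat) :
    (pyCombinations xs r).Perm (List.sublistsLen r xs) := by
  induction xs generalizing r with
  | nil => cases r <;> simp [pyCombinations]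
  | cons x xs ih =>
    cases r with
    | zero => simp [pyCombinations]
    | succ r =>
      rw [List.sublistsLen_succ_cons]
      exact (List.Perm.append ((ih r).map _) (ih (r + 1))).trans (List.perm_append_comm)

def Usum (visits : List Int) (t : Int) (m : Nat) : Int :=
  (((List.range m).flatMap (fun r => List.sublistsLen r visits)).countP
    (fun q => decide (q.sum < t)) : Nat)

theorem Usum_succ (visits : List Int) (t : Int) (m : Nat) :
    Usum visits t (m + 1) = Usum visits t m
      + ((List.sublistsLen m visits).countP (fun q => decide (q.sum < t)) : Nat) := by
  simp [Usum, List.range_succ, List.countP_append]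

theorem outer_fold (visits : List Int) (t : Int) (n : Nat) (acc : Int) :
    (List.range n).foldl (fun acc k => (pyCombinations visits (k + 1)).foldl
        (fun a c => if c.sum < t then a + 1 else a) acc) acc
      = acc + Usum visits t (n + 1) - Usum visits t 1 := by
  induction n generalizing acc with
  | zero => simp
  | succ n ih =>
    rw [List.range_succ, List.foldl_append]
    simp only [List.foldl_cons, List.foldl_nil]
    rw [ih, foldl_count t, (pyCombinations_perm visits (n + 1)).countP_eq, Usum_succ visits t (n + 1)]
    ring

theorem A_side (visits : List Int) (target : Int) :
    (PySem.List.pyRange 1 ((visits.length : Int) + 1) 1).foldl (fun acc r =>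
      (pyCombinations visits r.toNat).foldl
        (fun acc comb => if comb.sum < target then acc + 1 else acc) acc) 0
    = nlt visits target - (if 0 < target then 1 else 0) := by
  rw [PySem.List.pyRange_one]
  have h1 : (((visits.length : Int) + 1) - 1).toNat = visits.length := by omega
  rw [h1, List.foldl_map]
  have h2 : ∀ (k : Nat), ((1 : Int) + (k : Nat)).toNat = k + 1 := by intro k; omega
  simp only [h2]
  rw [outer_fold]
  have h3 : Usum visits target (visits.length + 1) = nlt visits target := by
    unfold Usum nlt
    congr 1
    rw [((List.range_bind_sublistsLen_perm visits).countP_eq _),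
      ← ((List.sublists_perm_sublists' visits).countP_eq _)]
  have h4 : Usum visits target 1 = (if 0 < target then 1 else 0) := by
    by_cases h : 0 < target <;> simp [Usum, List.range_succ, h]
  rw [h3, h4]; ring

-- ---- B side ----
theorem inner_getD (v : Int) (ps : List (Int × Int)) (d : PySem.Dict Int Int) (u : Int) :
    (ps.foldl (fun nw p => nw.insert (p.1 + v) (nw.getD (p.1 + v) 0 + p.2)) d).getD u 0
      = d.getD u 0 + ((ps.filter (fun p => p.1 == u - v)).map (·.2)).sum := by
  induction ps generalizing d with
  | nil => simp
  | cons p ps ih =>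
    simp only [List.foldl_cons, List.filter_cons, ih]
    rw [PySem.Dict.getD_insert]
    by_cases h : p.1 = u - v
    · have hu : u = p.1 + v := by omega
      simp [h, hu.symm]
      ring
    · have hu : ¬ (u = p.1 + v) := by omega
      simp [h, hu]

theorem filter_items_sum (d : PySem.Dict Int Int) (k : Int) (hnd : d.keys.Nodup) :
    ((d.items.filter (fun p => p.1 == k)).map (·.2)).sum = d.getD k 0 := by
  obtain ⟨l⟩ := d
  induction l with
  | nil => simp [PySem.Dict.getD, PySem.Dict.get?]
  | cons p l ih =>
    simp only [PySem.Dict.keys, List.map_cons, List.nodup_cons] at hnd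
    rw [PySem.Dict.getD_eq_get?_getD, PySem.Dict.get?_mk_cons]
    by_cases h : p.1 = k
    · subst h
      have hfil : l.filter (fun q => q.1 == p.1) = [] := by
        rw [List.filter_eq_nil_iff]
        intro q hq hb
        exact hnd.1 ((beq_iff_eq.mp hb) ▸ List.mem_map_of_mem hq)
      simpa [List.filter_cons, hfil] using rfl
    · have hb : (p.1 == k) = false := by simpa using h
      simp only [List.filter_cons, hb, if_false, Bool.false_eq_true]
      rw [← PySem.Dict.getD_eq_get?_getD]
      exact ih hnd.2

theorem foldl_total (t : Int) (ps : List (Int × Int)) (acc : Int) :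
    ps.foldl (fun acc p => if p.1 < t then acc + p.2 else acc) acc
      = acc + (ps.map (fun p => if p.1 < t then p.2 else 0)).sum := by
  induction ps generalizing acc with
  | nil => simp
  | cons p ps ih =>
    simp only [List.foldl_cons, List.map_cons, List.sum_cons, ih]
    by_cases h : p.1 < t <;> simp [h] <;> ring

theorem sum_ind_one (t a : Int) (K : List Int) (hnd : K.Nodup) (ha : a ∈ K) :
    (K.map (fun k => if k < t ∧ k = a then (1 : Int) else 0)).sum = if a < t then 1 else 0 := by
  induction K with
  | nil => simp at ha
  | cons b K ih =>
    simp only [List.nodup_cons] at hnd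
    simp only [List.map_cons, List.sum_cons]
    rcases List.mem_cons.mp ha with h | h
    · subst h
      have : (K.map (fun k => if k < t ∧ k = a then (1 : Int) else 0)).sum = 0 := by
        apply List.sum_eq_zero; intro x hx
        simp only [List.mem_map] at hx
        obtain ⟨k, hk, hkx⟩ := hx
        have : ¬ (k = a) := fun he => hnd.1 (he ▸ hk)
        simp [this] at hkx; omega
      rw [this]
      by_cases hb : a < t <;> simp [hb]
    · have hba : ¬ (b = a) := fun he => hnd.1 (he ▸ h)
      rw [ih hnd.2 h]
      simp [hba]

theorem sum_indicator (t : Int) (L : List (List Int)) (K : List Int) (hnd : K.Nodup)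
    (hmem : ∀ q ∈ L, q.sum ∈ K) :
    (K.map (fun k => if k < t then ((L.countP (fun q => q.sum == k) : Nat) : Int) else 0)).sum
      = ((L.countP (fun q => decide (q.sum < t)) : Nat) : Int) := by
  induction L with
  | nil => simp [List.sum_eq_zero]
  | cons q L ih =>
    have hq := hmem q (by simp)
    have hL : ∀ p ∈ L, p.sum ∈ K := fun p hp => hmem p (by simp [hp])
    simp only [List.countP_cons]
    have split : (K.map (fun k => if k < t then ((L.countP (fun q' => q'.sum == k) +
        if q.sum == k then 1 else 0 : Nat) : Int) else 0)).sum
        = (K.map (fun k => if k < t then ((L.countP (fun q' => q'.sum == k) : Nat) : Int) else 0)).sum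
          + (K.map (fun k => if k < t ∧ k = q.sum then (1 : Int) else 0)).sum := by
      rw [← List.sum_map_add]
      congr 1
      apply List.map_congr_left
      intro k _
      by_cases h1 : k < t <;> by_cases h2 : q.sum = k
      · have h2' : k = q.sum := h2.symm
        have h3 : q.sum < t := h2' ▸ h1
        simp [h2', h3]
      · have : (q.sum == k) = false := by simpa using h2
        have h2' : ¬ (k = q.sum) := fun he => h2 he.symm
        simp [h1, this, h2']
      · have h2' : k = q.sum := h2.symm
        have h3 : ¬ (q.sum < t) := h2' ▸ h1
        simp [h2', h3]
      · have h2' : ¬ (k = q.sum) := fun he => h2 he.symm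
        simp [h1, h2']
    rw [split, ih hL, sum_ind_one t q.sum K hnd hq]
    by_cases h : q.sum < t <;> simp [h]

def dictOf (l : List Int) : PySem.Dict Int Int :=
  l.foldl (fun counts v =>
      counts.items.foldl (fun nw p => nw.insert (p.1 + v) (nw.getD (p.1 + v) 0 + p.2)) counts)
    ((PySem.Dict.empty : PySem.Dict Int Int).insert 0 1)

theorem dict_invariant (l : List Int) :
    (dictOf l).keys.Nodup ∧ (∀ s, (dictOf l).getD s 0 = nsum l s) ∧
      (∀ s, nsum l s ≠ 0 → s ∈ (dictOf l).keys) := by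
  induction l using List.reverseRecOn with
  | nil =>
    refine ⟨by decide, fun s => ?_, fun s h => ?_⟩
    · show ((PySem.Dict.empty : PySem.Dict Int Int).insert 0 1).getD s 0 = nsum [] s
      rw [PySem.Dict.getD_insert]
      by_cases h : s = 0
      · simp [h, nsum]
      · simp [h, nsum, Ne.symm h, PySem.Dict.getD_empty]
    · by_cases h0 : s = 0
      · subst h0; decide
      · exfalso; apply h; simp [nsum]
        intro he; omega
  | append_singleton l v ih =>
    obtain ⟨hnd, hget, hmem⟩ := ih
    have hstep : dictOf (l ++ [v]) =
        (dictOf l).items.foldl (fun nw p => nw.insert (p.1 + v) (nw.getD (p.1 + v) 0 + p.2)) (dictOf l) := by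
      simp [dictOf, List.foldl_append]
    have hkeys : (dictOf (l ++ [v])).keys
        = PySem.Set.update (dictOf l).keys ((dictOf l).items.map (fun p => p.1 + v)) := by
      rw [hstep]
      exact PySem.Dict.keys_foldl_insert_key _ _ _ _
    refine ⟨?_, fun s => ?_, fun s h => ?_⟩
    · rw [hstep]; exact PySem.Dict.nodup_keys_foldl_insert_key _ _ _ _ hnd
    · rw [hstep, inner_getD, filter_items_sum _ _ hnd, hget, hget, nsum_concat]
    · rw [nsum_concat] at h
      rw [hkeys, PySem.Set.update_map_eq_foldl_add]
      rw [PySem.Set.mem_foldl_add]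
      have h1 := nsum_nonneg l s
      have h2 := nsum_nonneg l (s - v)
      rcases (by omega : nsum l s ≠ 0 ∨ nsum l (s - v) ≠ 0) with hc | hc
      · exact Or.inl (hmem s hc)
      · right
        have : s - v ∈ (dictOf l).keys := hmem _ hc
        simp only [PySem.Dict.keys, List.mem_map] at this
        obtain ⟨p, hp, hps⟩ := this
        exact ⟨p, hp, by omega⟩

theorem B_side (visits : List Int) (target : Int) :
    (dictOf visits).items.foldl (fun acc p => if p.1 < target then acc + p.2 else acc) 0
      = nlt visits target := by
  obtain ⟨hnd, hget, hmem⟩ := dict_invariant visits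
  rw [foldl_total, PySem.Dict.items_eq_map_keys _ hnd 0, List.map_map]
  have heq : ((fun p : Int × Int => if p.1 < target then p.2 else 0) ∘ fun k => (k, (dictOf visits).getD k 0))
      = fun k => if k < target then ((visits.sublists.countP (fun q => q.sum == k) : Nat) : Int) else 0 := by
    funext k
    simp [hget k, nsum]
  rw [heq, sum_indicator target _ _ hnd]
  · simp [nlt]
  · intro q hq
    apply hmem
    have hpos : 0 < visits.sublists.countP (fun q' => q'.sum == q.sum) := by
      rw [List.countP_pos_iff]
      exact ⟨q, hq, by simp⟩
    unfold nsum
    exact_mod_cast hpos.ne'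

-- ===== VERDICT (by name: the statement is the Claim_ definition above) =====
theorem count_valid_combinations_spec : Claim_equal_count_valid_combinations := by
  intro visits target _
  unfold Spec_count_valid_combinations count_valid_combinations count_valid_combinations_alt
  by_cases h : visits.sum = target
  · simp only [h, ne_eq, not_true_eq_false, if_false]
    rw [A_side visits target, ← dictOf, B_side visits target]
  · simp [h]
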